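-- pv_equiv track=rewrite | github.com/mahita-panga/byte_busters | api_code/algorithms/a_star.py | get_deliberate_rain_paths
-- ===== SOURCE A (Python) =====
-- def get_deliberate_rain_paths(paths):
--     best_path_set = set(tuple(coord) for coord in paths[0])
--     clusters = []
--
--     for path in paths[1:]:
--         path_clusters = []
--         for i in range(len(path) - 2):
--             cluster = path[i:i + 3]
--             if any(tuple(coord) not in best_path_set for coord in cluster):
--                 path_clusters.append(cluster)
--         clusters.append(path_clusters)
--
--     return [item for sublist in clusters for item in sublist if sublist]
-- ===== SOURCE B (Python) =====
-- def get_deliberate_rain_paths(paths):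
--     best = set(map(tuple, paths[0]))
--     out = []
--     for path in paths[1:]:
--         n = len(path)
--         offs = [p for p, coord in enumerate(path) if tuple(coord) not in best]
--         starts = set()
--         for p in offs:
--             for s in range(max(0, p - 2), min(p, n - 3) + 1):
--                 starts.add(s)
--         for s in sorted(starts):
--             out.append(path[s:s + 3])
--     return out
-- ===== Notes on version B (the rewrite author's own statement) =====
-- stated objective: alternative
-- what changed: Instead of testing every 3-window with any(), B scans each path once for positions off the best-path set, converts each such position into its range of covered window starts, and emits the slices at the sorted union of those starts.
-- outside the precondition, e.g. on get_deliberate_rain_paths([]): A raises IndexError, B raises IndexError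
import Mathlib
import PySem

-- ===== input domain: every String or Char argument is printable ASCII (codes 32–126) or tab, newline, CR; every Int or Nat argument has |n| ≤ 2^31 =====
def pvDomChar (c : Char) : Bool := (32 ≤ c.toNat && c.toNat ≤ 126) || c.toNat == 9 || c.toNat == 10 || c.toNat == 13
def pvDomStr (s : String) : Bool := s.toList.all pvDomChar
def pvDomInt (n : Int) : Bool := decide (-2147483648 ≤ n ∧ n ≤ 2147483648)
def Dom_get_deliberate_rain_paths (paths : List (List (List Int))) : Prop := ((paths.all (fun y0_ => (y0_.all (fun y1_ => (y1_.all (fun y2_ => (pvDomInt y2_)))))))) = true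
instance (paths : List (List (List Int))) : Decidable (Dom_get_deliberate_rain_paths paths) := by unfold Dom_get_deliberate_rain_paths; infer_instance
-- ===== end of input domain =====

-- B replaces A's test-every-3-window scan by first indexing the off-best-path positions and
-- converting them into the sorted set of covered window starts (objective: alternative decomposition).

-- ===== PORT A =====
-- inner loop 'for i in range(len(path) - 2): …' of A
def pvA_inner (best : PySem.Set (List Int)) (path : List (List Int)) : List (List (List Int)) :=
  (PySem.List.pyRange 0 (PySem.List.len path - 2) 1).foldl (fun pc i =>
    let cluster := PySem.List.slice path (some i) (some (i + 3))
    if cluster.any (fun coord => !(PySem.Set.contains best coord)) then pc ++ [cluster] else pc) []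

def get_deliberate_rain_paths (paths : List (List (List Int))) : List (List (List Int)) :=
  -- paths[0]: total form pyGetD, guarded by Pre_ (paths ≠ [])
  let best := PySem.Set.ofList (PySem.List.pyGetD paths 0 [])
  let clusters := (PySem.List.slice paths (some 1) none).foldl
    (fun cs path => cs ++ [pvA_inner best path]) []
  -- [item for sublist in clusters for item in sublist if sublist]
  clusters.foldl (fun acc sub =>
    sub.foldl (fun acc item => if sub.isEmpty then acc else acc ++ [item]) acc) []

-- ===== PORT B =====
-- offs = [p for p, coord in enumerate(path) if tuple(coord) not in best]
def pvB_offs (best : PySem.Set (List Int)) (path : List (List Int)) : List Int :=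
  ((PySem.List.enumerate path 0).filter (fun pc => !(PySem.Set.contains best pc.2))).map (·.1)

-- starts = set(); for p in offs: for s in range(max(0, p-2), min(p, n-3)+1): starts.add(s)
def pvB_starts (n : Int) (offs : List Int) : PySem.Set Int :=
  offs.foldl (fun st p =>
    (PySem.List.pyRange (max 0 (p - 2)) (min p (n - 3) + 1) 1).foldl
      (fun st s => PySem.Set.add st s) st) (PySem.Set.ofList [])

def get_deliberate_rain_paths_alt (paths : List (List (List Int))) : List (List (List Int)) :=
  let best := PySem.Set.ofList (PySem.List.pyGetD paths 0 [])
  (PySem.List.slice paths (some 1) none).foldl (fun out path =>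
    let n := PySem.List.len path
    let starts := pvB_starts n (pvB_offs best path)
    (PySem.List.sorted starts (fun x => x)).foldl
      (fun out s => out ++ [PySem.List.slice path (some s) (some (s + 3))]) out) []

-- ===== PRECONDITION & SPEC =====
-- Pre_ excludes only paths = [], on which Python A raises IndexError at paths[0] (B raises there too).
def Pre_get_deliberate_rain_paths (paths : List (List (List Int))) : Prop := paths ≠ []
instance (paths : List (List (List Int))) : Decidable (Pre_get_deliberate_rain_paths paths) := by unfold Pre_get_deliberate_rain_paths; infer_instance
def pvWitness_get_deliberate_rain_paths : List (List (List Int)) := [[[0, 0]], [[1, 1], [2, 2], [3, 3], [0, 0]]]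

def Spec_get_deliberate_rain_paths (paths : List (List (List Int))) (out : List (List (List Int))) : Prop := out = get_deliberate_rain_paths_alt paths
instance (paths : List (List (List Int))) (out : List (List (List Int))) : Decidable (Spec_get_deliberate_rain_paths paths out) := by unfold Spec_get_deliberate_rain_paths; infer_instance

-- ===== CLAIM (what is proved, stated in full; the proofs are below) =====
def Claim_equal_get_deliberate_rain_paths : Prop := ∀ (paths : List (List (List Int))), Dom_get_deliberate_rain_paths paths → Pre_get_deliberate_rain_paths paths → Spec_get_deliberate_rain_paths paths (get_deliberate_rain_paths paths)

-- ===== LEMMAS AND PROOFS =====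

-- a foldl of set-adds is a set update
theorem pv_foldl_add_eq_update (l : List Int) (s : PySem.Set Int) :
    l.foldl (fun s b => PySem.Set.add s b) s = PySem.Set.update s l := by
  have h := PySem.Set.update_map_eq_foldl_add l (fun x => x) s
  simpa using h.symm

theorem pv_starts_nodup (n : Int) (offs : List Int) : (pvB_starts n offs).Nodup := by
  unfold pvB_starts
  suffices h : ∀ (st : PySem.Set Int), st.Nodup →
      (offs.foldl (fun st p =>
        (PySem.List.pyRange (max 0 (p - 2)) (min p (n - 3) + 1) 1).foldl
          (fun st s => PySem.Set.add st s) st) st).Nodup by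
    exact h _ List.nodup_nil
  induction offs with
  | nil => intro st hst; simpa using hst
  | cons p rest ih =>
      intro st hst
      simp only [List.foldl_cons]
      exact ih _ (by rw [pv_foldl_add_eq_update]; exact PySem.Set.nodup_update _ _ hst)

theorem pv_mem_starts (n : Int) (offs : List Int) (x : Int) :
    x ∈ pvB_starts n offs ↔ ∃ p ∈ offs, max 0 (p - 2) ≤ x ∧ x < min p (n - 3) + 1 := by
  unfold pvB_starts
  suffices h : ∀ (st : PySem.Set Int),
      (x ∈ offs.foldl (fun st p =>
        (PySem.List.pyRange (max 0 (p - 2)) (min p (n - 3) + 1) 1).foldl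
          (fun st s => PySem.Set.add st s) st) st ↔
       x ∈ st ∨ ∃ p ∈ offs, max 0 (p - 2) ≤ x ∧ x < min p (n - 3) + 1) by
    simpa using h (PySem.Set.ofList [])
  induction offs with
  | nil => intro st; simp
  | cons p rest ih =>
      intro st
      simp only [List.foldl_cons]
      rw [ih]
      rw [pv_foldl_add_eq_update, PySem.Set.mem_update]
      simp only [PySem.List.mem_pyRange_one, List.mem_cons]
      constructor
      · rintro ((h | h) | ⟨q, hq, hb⟩)
        · exact Or.inl h
        · exact Or.inr ⟨p, Or.inl rfl, h⟩
        · exact Or.inr ⟨q, Or.inr hq, hb⟩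
      · rintro (h | ⟨q, (rfl | hq), hb⟩)
        · exact Or.inl (Or.inl h)
        · exact Or.inl (Or.inr hb)
        · exact Or.inr ⟨q, hq, hb⟩

-- membership in a 3-window slice, for a start inside range(len - 2)
theorem pv_mem_window (path : List (List Int)) (i : Int) (h0 : 0 ≤ i)
    (h2 : i < (path.length : Int) - 2) (c : List Int) :
    c ∈ PySem.List.slice path (some i) (some (i + 3)) ↔
      ∃ (k : Nat), k < path.length ∧ (i ≤ (k : Int) ∧ (k : Int) < i + 3) ∧ path[k]! = c := by
  rw [PySem.List.slice_toNat path h0 (by omega)]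
  have h3 : (i + 3).toNat - i.toNat = 3 := by omega
  rw [h3]
  constructor
  · intro hc
    rw [List.mem_iff_getElem] at hc
    obtain ⟨j, hj, hje⟩ := hc
    simp only [List.getElem_take, List.getElem_drop] at hje
    have hjlen : i.toNat + j < path.length := by
      have := hj
      simp [List.length_take, List.length_drop] at this
      omega
    refine ⟨i.toNat + j, hjlen, by
      constructor <;> [omega; skip]
      have hj3 : j < 3 := by
        have := hj; simp [List.length_take, List.length_drop] at this; omega
      omega, ?_⟩
    rw [getElem!_pos path _ hjlen]
    exact hje
  · rintro ⟨k, hk, ⟨hik, hik3⟩, hke⟩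
    rw [List.mem_iff_getElem]
    have hkj : i.toNat ≤ k := by omega
    refine ⟨k - i.toNat, ?_, ?_⟩
    · simp [List.length_take, List.length_drop]; omega
    · simp only [List.getElem_take, List.getElem_drop]
      have : i.toNat + (k - i.toNat) = k := by omega
      rw [getElem!_pos path k hk] at hke
      simp only [this]
      exact hke

theorem pv_mem_offs (best : PySem.Set (List Int)) (path : List (List Int)) (p : Int) :
    p ∈ pvB_offs best path ↔
      ∃ (k : Nat), k < path.length ∧ p = (k : Int) ∧ PySem.Set.contains best path[k]! = false := by
  unfold pvB_offs
  simp only [List.mem_map, List.mem_filter, PySem.List.mem_enumerate_iff]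
  constructor
  · rintro ⟨⟨q, c⟩, ⟨⟨k, hk, hpr⟩, hoff⟩, hfst⟩
    rw [Prod.mk.injEq] at hpr
    obtain ⟨hq, hc⟩ := hpr
    refine ⟨k, hk, ?_, ?_⟩
    · simp only [← hfst]; omega
    · rw [getElem!_pos path k hk]
      simp only [hc] at hoff
      simpa using hoff
  · rintro ⟨k, hk, hp, hoff⟩
    refine ⟨((k : Int), path[k]), ⟨⟨k, hk, by simp⟩, ?_⟩, by simpa using hp.symm⟩
    rw [getElem!_pos path k hk] at hoff
    simpa using hoff

-- the key per-path fact: the sorted covered-starts set IS the list of qualifying window starts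
theorem pv_perpath (best : PySem.Set (List Int)) (path : List (List Int)) :
    PySem.List.sorted (pvB_starts (PySem.List.len path) (pvB_offs best path)) (fun x => x) =
      (PySem.List.pyRange 0 ((PySem.List.len path) - 2) 1).filter
        (fun i => (PySem.List.slice path (some i) (some (i + 3))).any
          (fun coord => !(PySem.Set.contains best coord))) := by
  apply PySem.List.sorted_eq_of_perm_of_pairwise_lt
  · rw [List.perm_ext_iff_of_nodup (List.Nodup.filter _ (PySem.List.nodup_pyRange_one _ _))
        (pv_starts_nodup _ _)]
    intro x
    rw [pv_mem_starts, List.mem_filter]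
    simp only [PySem.List.mem_pyRange_one, PySem.List.len_eq]
    constructor
    · intro ⟨hr, hq⟩
      obtain ⟨h0, h2⟩ := hr
      rw [List.any_eq_true] at hq
      obtain ⟨c, hc, hcoff⟩ := hq
      rw [pv_mem_window path x h0 h2 c] at hc
      obtain ⟨k, hk, ⟨hik, hik3⟩, hke⟩ := hc
      refine ⟨(k : Int), ?_, ?_⟩
      · rw [pv_mem_offs]
        exact ⟨k, hk, rfl, by rw [hke]; simpa using hcoff⟩
      · constructor <;> [omega; skip]
        have : ((k : Int)) < (path.length : Int) := by exact_mod_cast hk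
        omega
    · rintro ⟨p, hp, hlo, hhi⟩
      rw [pv_mem_offs] at hp
      obtain ⟨k, hk, rfl, hoff⟩ := hp
      have hklen : ((k : Int)) < (path.length : Int) := by exact_mod_cast hk
      have h0 : 0 ≤ x := by omega
      have h2 : x < (path.length : Int) - 2 := by omega
      refine ⟨⟨h0, h2⟩, ?_⟩
      rw [List.any_eq_true]
      refine ⟨path[k]!, ?_, by simpa using hoff⟩
      rw [pv_mem_window path x h0 h2]
      exact ⟨k, hk, ⟨by omega, by omega⟩, rfl⟩
  · exact List.Pairwise.filter _ (PySem.List.pairwise_lt_pyRange_one _ _)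

-- A's flattening comprehension is a plain flatten
theorem pv_flattenA (clusters : List (List (List (List Int)))) (acc : List (List (List Int))) :
    clusters.foldl (fun acc sub =>
      sub.foldl (fun acc item => if sub.isEmpty then acc else acc ++ [item]) acc) acc =
      acc ++ clusters.flatMap id := by
  induction clusters generalizing acc with
  | nil => simp
  | cons sub rest ih =>
      simp only [List.foldl_cons, List.flatMap_cons, id]
      rw [ih]
      cases sub with
      | nil => simp
      | cons y ys =>
          simp only [List.isEmpty_cons, Bool.false_eq_true, if_false]
          rw [PySem.List.foldl_append_singleton]
          simp

-- ===== VERDICT (by name: the statement is the Claim_ definition above) =====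
theorem get_deliberate_rain_paths_spec : Claim_equal_get_deliberate_rain_paths := by
  intro paths _ _
  unfold Spec_get_deliberate_rain_paths get_deliberate_rain_paths get_deliberate_rain_paths_alt
  simp only []
  rw [PySem.List.foldl_append_singleton_eq_map, List.nil_append, pv_flattenA, List.nil_append]
  induction (PySem.List.slice paths (some 1) none) using List.reverseRecOn with
  | nil => simp
  | append_singleton rest path ih =>
      rw [List.map_append, List.flatMap_append, List.foldl_append, ← ih]
      simp only [List.map_cons, List.map_nil, List.flatMap_cons, List.flatMap_nil,
        List.append_nil, List.foldl_cons, List.foldl_nil, id]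
      rw [pv_perpath, pvA_inner, PySem.List.foldl_append_if]
      rw [PySem.List.foldl_append_singleton_eq_map]
      simp
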